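-- pv_equiv track=rewrite | github.com/zhaolei0505/andb | andb/fmt/sourcemap.py | decode_vlq
-- ===== SOURCE A (Python) =====
-- def from_base64_vlq(value):
--     BASE64_CHARS = "ABCDEFGHIJKLMNOPQRSTUVWXYZabcdefghijklmnopqrstuvwxyz0123456789+/"
--     return BASE64_CHARS.index(value)
--
-- def decode_vlq(encoded):
--     shift = 0
--     result = 0
--     continuation = False
--     decoded_values = []
--
--     for char in encoded:
--         # Convert base64 character to a value
--         value = from_base64_vlq(char)
--
--         # Check if the continuation bit is set
--         continuation = value & 0x20
--         # Obtain the next 5 bits of the value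
--         value &= 0x1F
--         result += value << shift
--         shift += 5
--
--         if not continuation:
--             # If the result is negative, perform the necessary conversion
--             if result & 1:
--                 result = -(result >> 1)
--             else:
--                 result = result >> 1
--             # Append the result to the list of decoded values
--             decoded_values.append(result)
--             # Reset variables for the next value
--             result = 0
--             shift = 0
--
--     if continuation:
--         raise ValueError("Incomplete VLQ sequence")
--
--     return decoded_values
-- ===== SOURCE B (Python) =====
-- def from_base64_vlq(value):
--     BASE64_CHARS = "ABCDEFGHIJKLMNOPQRSTUVWXYZabcdefghijklmnopqrstuvwxyz0123456789+/"
--     return BASE64_CHARS.index(value)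
--
-- def decode_vlq(encoded):
--     # Pass 1: split the character values into VLQ groups; a group ends at
--     # each value whose continuation bit (0x20) is clear.
--     groups = []
--     pending = []
--     for char in encoded:
--         pending.append(from_base64_vlq(char))
--         if not (pending[-1] & 0x20):
--             groups.append(pending)
--             pending = []
--     if pending:
--         raise ValueError("Incomplete VLQ sequence")
--
--     # Pass 2: decode each group independently.
--     decoded_values = []
--     for group in groups:
--         n = 0
--         for i, v in enumerate(group):
--             n += (v & 0x1F) << (5 * i)
--         decoded_values.append(-(n >> 1) if n & 1 else n >> 1)
--     return decoded_values
-- ===== Notes on version B (the rewrite author's own statement) =====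
-- stated objective: alternative
-- what changed: A decodes in one pass carrying shift/result/continuation state; B first partitions the character values into VLQ groups at clear continuation bits, then decodes each group independently with an enumerate-based fold and the zig-zag sign rule.
import Mathlib
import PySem

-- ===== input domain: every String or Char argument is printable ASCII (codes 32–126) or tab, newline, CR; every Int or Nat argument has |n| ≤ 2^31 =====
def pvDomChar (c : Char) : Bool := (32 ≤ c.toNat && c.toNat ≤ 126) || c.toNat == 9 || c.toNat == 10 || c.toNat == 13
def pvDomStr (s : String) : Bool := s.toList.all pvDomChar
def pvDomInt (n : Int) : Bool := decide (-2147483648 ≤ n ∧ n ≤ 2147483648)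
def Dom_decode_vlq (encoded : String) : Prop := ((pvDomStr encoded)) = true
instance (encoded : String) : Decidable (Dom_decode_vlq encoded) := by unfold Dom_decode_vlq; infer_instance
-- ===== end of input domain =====

-- B splits the input into VLQ groups first and then decodes each group; same values as A
-- (an alternative decomposition, not claimed faster).

-- ===== PORT A =====
def BASE64_CHARS : String := "ABCDEFGHIJKLMNOPQRSTUVWXYZabcdefghijklmnopqrstuvwxyz0123456789+/"

-- str.index raises ValueError when absent → none (excluded by Pre_)
def from_base64_vlq (value : Char) : Option Int :=
  (PySem.List.index? BASE64_CHARS.toList value).map (fun k => (k : Int))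

-- the for-loop of A, carrying (shift, result, decoded_values); `result >> 1` on the
-- nonnegative accumulator is floor division by 2, `value << shift` is * 2^shift
def decode_vlq_go : List Char → Int → Int → List Int → List Int
  | [], _shift, _result, acc => acc  -- a final set continuation bit raises (excluded by Pre_)
  | c :: rest, shift, result, acc =>
    match from_base64_vlq c with
    | none => acc  -- ValueError from from_base64_vlq (excluded by Pre_)
    | some value =>
      let continuation := value.land 0x20
      let value := value.land 0x1F
      let result := result + value * 2 ^ shift.toNat
      let shift := shift + 5
      if continuation == 0 then
        let r := if result.land 1 == 1 then -(PySem.Int.floordiv result 2)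
                 else PySem.Int.floordiv result 2
        decode_vlq_go rest 0 0 (acc ++ [r])
      else
        decode_vlq_go rest shift result acc

def decode_vlq (encoded : String) : List Int :=
  decode_vlq_go encoded.toList 0 0 []

-- ===== PORT B =====
-- pass 1 of Source B: split character values into groups ending at a clear continuation bit
def vlq_groups : List Char → List Int → List (List Int)
  | [], _pending => []  -- nonempty pending raises ValueError (excluded by Pre_)
  | c :: rest, pending =>
    match from_base64_vlq c with
    | none => []  -- ValueError from from_base64_vlq (excluded by Pre_)
    | some v =>
      if v.land 0x20 == 0 then (pending ++ [v]) :: vlq_groups rest []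
      else vlq_groups rest (pending ++ [v])

-- pass 2 of Source B: decode one group (`>> 1` on the nonnegative n is floor division by 2)
def decode_group (group : List Int) : Int :=
  let n := (PySem.List.enumerate group 0).foldl
      (fun n iv => n + (iv.2.land 0x1F) * 2 ^ (5 * iv.1).toNat) 0
  if n.land 1 == 1 then -(PySem.Int.floordiv n 2) else PySem.Int.floordiv n 2

def decode_vlq_alt (encoded : String) : List Int :=
  (vlq_groups encoded.toList []).map decode_group

-- ===== PRECONDITION & SPEC =====
-- Pre_ excludes exactly the inputs on which A raises ValueError: a character outside the
-- base64 alphabet A-Z a-z 0-9 + / (str.index), or a last character with the continuation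
-- bit set (the characters of index ≥ 32, i.e. outside A-Z and a-f).
def pvB64Char (c : Char) : Bool :=
  (65 ≤ c.toNat && c.toNat ≤ 90) || (97 ≤ c.toNat && c.toNat ≤ 122) ||
  (48 ≤ c.toNat && c.toNat ≤ 57) || c.toNat == 43 || c.toNat == 47
def pvGroupEnd (c : Char) : Bool := (65 ≤ c.toNat && c.toNat ≤ 90) || (97 ≤ c.toNat && c.toNat ≤ 102)
def Pre_decode_vlq (encoded : String) : Prop :=
  (encoded.toList.all pvB64Char = true) ∧ (encoded.toList.getLast?.all pvGroupEnd = true)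
instance (encoded : String) : Decidable (Pre_decode_vlq encoded) := by unfold Pre_decode_vlq; infer_instance

def pvWitness_decode_vlq : String := "uDnB"

def Spec_decode_vlq (encoded : String) (out : List Int) : Prop := out = decode_vlq_alt encoded
instance (encoded : String) (out : List Int) : Decidable (Spec_decode_vlq encoded out) := by unfold Spec_decode_vlq; infer_instance

-- ===== CLAIM (what is proved, stated in full; the proofs are below) =====
def Claim_equal_decode_vlq : Prop := ∀ (encoded : String), Dom_decode_vlq encoded → Pre_decode_vlq encoded → Spec_decode_vlq encoded (decode_vlq encoded)

-- ===== LEMMAS AND PROOFS =====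

-- the value of a group's 5-bit payloads starting at payload index k
def vlq_payload : List Int → Nat → Int
  | [], _ => 0
  | v :: t, k => (v.land 0x1F) * 2 ^ (5 * k) + vlq_payload t (k + 1)

theorem vlq_payload_append (p : List Int) (v : Int) :
    ∀ k, vlq_payload (p ++ [v]) k = vlq_payload p k + (v.land 0x1F) * 2 ^ (5 * (k + p.length)) := by
  induction p with
  | nil => intro k; simp [vlq_payload]
  | cons a t ih =>
      intro k
      simp only [List.cons_append, vlq_payload, ih (k + 1), List.length_cons]
      ring_nf

theorem fold_payload (g : List Int) :
    ∀ (k : Nat) (n : Int),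
      (PySem.List.enumerate g (k : Int)).foldl
        (fun n iv => n + (iv.2.land 0x1F) * 2 ^ (5 * iv.1).toNat) n
      = n + vlq_payload g k := by
  induction g with
  | nil => intro k n; simp [PySem.List.enumerate_nil, vlq_payload]
  | cons v t ih =>
      intro k n
      have hcast : ((k : Int) + 1) = ((k + 1 : Nat) : Int) := by push_cast; ring
      have htn : (5 * (k : Int)).toNat = 5 * k := by omega
      simp only [PySem.List.enumerate_cons, List.foldl_cons, hcast, ih, vlq_payload, htn]
      ring_nf

theorem decode_group_payload (g : List Int) :
    decode_group g =
      (if (vlq_payload g 0).land 1 == 1 then -(PySem.Int.floordiv (vlq_payload g 0) 2)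
       else PySem.Int.floordiv (vlq_payload g 0) 2) := by
  have h := fold_payload g 0 0
  simp only [Nat.cast_zero] at h
  simp [decode_group, h]

theorem decode_vlq_go_groups (cs : List Char) :
    ∀ (pending acc : List Int),
      (∀ c ∈ cs, (from_base64_vlq c).isSome) →
      decode_vlq_go cs (5 * (pending.length : Int)) (vlq_payload pending 0) acc
        = acc ++ (vlq_groups cs pending).map decode_group := by
  induction cs with
  | nil => intro pending acc _; simp [decode_vlq_go, vlq_groups]
  | cons c rest ih =>
      intro pending acc h
      obtain ⟨v, hv⟩ := Option.isSome_iff_exists.mp (h c (List.mem_cons_self))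
      have hrest : ∀ c ∈ rest, (from_base64_vlq c).isSome :=
        fun c hc => h c (List.mem_cons_of_mem _ hc)
      have htn : (5 * (pending.length : Int)).toNat = 5 * pending.length := by omega
      have hres : vlq_payload pending 0 + v.land 0x1F * 2 ^ (5 * (pending.length : Int)).toNat
          = vlq_payload (pending ++ [v]) 0 := by
        rw [htn, vlq_payload_append]; simp
      have ih0 : ∀ acc2, decode_vlq_go rest 0 0 acc2
          = acc2 ++ (vlq_groups rest []).map decode_group := by
        intro acc2
        simpa [vlq_payload] using ih [] acc2 hrest
      by_cases hcont : v.land 0x20 == 0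
      · simp only [decode_vlq_go, vlq_groups, hv, hcont, if_pos, hres, ih0]
        simp [decode_group_payload]
      · simp only [decode_vlq_go, vlq_groups, hv, hcont, hres]
        have hlen : 5 * (pending.length : Int) + 5 = 5 * (((pending ++ [v]).length : Nat) : Int) := by
          simp; ring
        rw [hlen, ih (pending ++ [v]) acc hrest]
        simp

set_option maxRecDepth 4000 in
theorem ofNat_mem_b64 : ∀ n, n < 123 → pvB64Char (Char.ofNat n) = true →
    Char.ofNat n ∈ BASE64_CHARS.toList := by decide

theorem mem_isSome (encoded : String) (hpre : Pre_decode_vlq encoded) :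
    ∀ c ∈ encoded.toList, (from_base64_vlq c).isSome := by
  intro c hc
  have hm := List.all_eq_true.mp hpre.1 c hc
  have hlt : c.toNat < 123 := by
    have hm2 := hm; simp [pvB64Char] at hm2; omega
  have hm' : pvB64Char (Char.ofNat c.toNat) = true := by rwa [Char.ofNat_toNat]
  have hmem := ofNat_mem_b64 c.toNat hlt hm'
  rw [Char.ofNat_toNat] at hmem
  have hs : (List.idxOf? c BASE64_CHARS.toList).isSome := List.isSome_idxOf?.mpr hmem
  obtain ⟨k, hk⟩ := Option.isSome_iff_exists.mp hs
  simp [from_base64_vlq, PySem.List.index?_eq_idxOf?, hk]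

-- ===== VERDICT (by name: the statement is the Claim_ definition above) =====
theorem decode_vlq_spec : Claim_equal_decode_vlq := by
  intro encoded _hdom hpre
  unfold Spec_decode_vlq decode_vlq decode_vlq_alt
  have h := decode_vlq_go_groups encoded.toList [] [] (mem_isSome encoded hpre)
  simpa [vlq_payload] using h
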